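-- pv_equiv track=rewrite | github.com/basilegithub/Multiple-Polynomial-Quadratic-Sieve | src/utils.py | compute_legendre_character
-- ===== SOURCE A (Python) =====
-- def compute_legendre_character(a, n):
--     a = a%n
--     t = 1
--     while a:
--         while not a&1:
--             a = a>>1
--             if n%8 == 3 or n%8 == 5: t = -t
--         a,n = n,a
--         if a%4 == n%4 and n%4 == 3: t = -t
--         a = a%n
--     if n == 1: return t
--     return 0
-- ===== SOURCE B (Python) =====
-- def compute_legendre_character(a, n):
--     # Pure recursion instead of A's nested mutating loops: the even part is
--     # split off in one recursive helper, each reciprocity step contributes a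
--     # multiplicative sign factor, and the base case decides 1/0.
--     def split2(x):
--         # (2-adic valuation, odd part) of a nonzero integer
--         if x % 2:
--             return 0, x
--         k, o = split2(x // 2)
--         return k + 1, o
--
--     def jac(a, n):
--         a %= n
--         if a == 0:
--             return 1 if n == 1 else 0
--         k, a = split2(a)
--         s = -1 if k % 2 == 1 and n % 8 in (3, 5) else 1
--         if a % 4 == 3 and n % 4 == 3:
--             s = -s
--         return s * jac(n, a)
--
--     return jac(a, n)
-- ===== Notes on version B (the rewrite author's own statement) =====
-- stated objective: alternative
-- what changed: Replaces A's iterative nested while-loops with in-place state mutation and sign flips by a pure recursive decomposition: a recursive helper splits off the 2-adic valuation and odd part in one call, each reciprocity step contributes a multiplicative sign factor (flip parity turned into one k%2 test), and the result is the product of these factors with the recursive Jacobi value.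
import Mathlib
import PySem

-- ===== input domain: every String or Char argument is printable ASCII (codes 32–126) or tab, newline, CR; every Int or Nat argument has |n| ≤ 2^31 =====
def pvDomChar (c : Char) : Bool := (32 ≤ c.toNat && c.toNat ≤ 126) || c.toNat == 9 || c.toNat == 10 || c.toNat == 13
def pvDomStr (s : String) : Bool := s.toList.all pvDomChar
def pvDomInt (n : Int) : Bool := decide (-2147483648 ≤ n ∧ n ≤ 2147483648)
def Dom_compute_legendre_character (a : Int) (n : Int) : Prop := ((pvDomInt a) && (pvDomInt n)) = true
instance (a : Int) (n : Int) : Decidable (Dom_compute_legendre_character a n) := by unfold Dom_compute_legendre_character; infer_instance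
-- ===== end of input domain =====

-- B replaces A's iterative nested loops (in-place mutation, per-step sign flips) by a pure
-- recursion: a helper splits off the 2-adic valuation and odd part, each reciprocity step
-- contributes a multiplicative sign factor; return values proved equal for every n ≠ 0.
-- Python while-loops / recursion are ported with a structural Nat fuel (a totality guard
-- only: the fuel provably exceeds the number of iterations, see the lemmas below).

-- ===== PORT A =====

-- inner 'while not a&1' loop of A; fuel a.natAbs is enough, |a| shrinks at each strip
def stripA : Nat → Int → Int → Int → Int × Int
  | 0, a, t, _ => (a, t)
  | fuel+1, a, t, n =>
    if PySem.Int.band a 1 = 0 then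
      stripA fuel (a >>> (1:Nat))
        (if PySem.Int.mod n 8 = 3 ∨ PySem.Int.mod n 8 = 5 then -t else t) n
    else (a, t)

-- outer 'while a' loop of A; |a| strictly shrinks each iteration
def loopA : Nat → Int → Int → Int → Int × Int
  | 0, _, n, t => (n, t)
  | fuel+1, a, n, t =>
    if a = 0 then (n, t)
    else
      let s := stripA a.natAbs a t n
      loopA fuel (PySem.Int.mod n s.1) s.1
        (if PySem.Int.mod n 4 = PySem.Int.mod s.1 4 ∧ PySem.Int.mod s.1 4 = 3 then -s.2 else s.2)

def compute_legendre_character (a : Int) (n : Int) : Int :=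
  let a0 := PySem.Int.mod a n
  let r := loopA (a0.natAbs + 1) a0 n 1
  if r.1 = 1 then r.2 else 0

-- ===== PORT B =====

-- B's recursive split2(x) = (2-adic valuation, odd part); fuel x.natAbs suffices
def split2B : Nat → Int → Nat × Int
  | 0, x => (0, x)
  | fuel+1, x =>
    if PySem.Int.mod x 2 ≠ 0 then (0, x)
    else
      let p := split2B fuel (PySem.Int.floordiv x 2)
      (p.1 + 1, p.2)

-- B's recursive jac(a, n); the reduced first argument strictly shrinks in |·| each call
def jacB : Nat → Int → Int → Int
  | 0, _, _ => 0
  | fuel+1, a, n =>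
    let a0 := PySem.Int.mod a n
    if a0 = 0 then (if n = 1 then 1 else 0)
    else
      let p := split2B a0.natAbs a0
      let s : Int := if p.1 % 2 = 1 ∧ (PySem.Int.mod n 8 = 3 ∨ PySem.Int.mod n 8 = 5) then -1 else 1
      let s : Int := if PySem.Int.mod p.2 4 = 3 ∧ PySem.Int.mod n 4 = 3 then -s else s
      s * jacB fuel n p.2

def compute_legendre_character_alt (a : Int) (n : Int) : Int :=
  jacB ((PySem.Int.mod a n).natAbs + 1) a n

-- ===== PRECONDITION & SPEC =====
-- Pre_ excludes exactly n = 0, where Python's 'a % n' raises ZeroDivisionError in both A and B.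
def Pre_compute_legendre_character (a : Int) (n : Int) : Prop := n ≠ 0
instance (a : Int) (n : Int) : Decidable (Pre_compute_legendre_character a n) := by
  unfold Pre_compute_legendre_character; infer_instance
def pvWitness_compute_legendre_character : Int × Int := (2, 15)

def Spec_compute_legendre_character (a : Int) (n : Int) (out : Int) : Prop := out = compute_legendre_character_alt a n
instance (a : Int) (n : Int) (out : Int) : Decidable (Spec_compute_legendre_character a n out) := by unfold Spec_compute_legendre_character; infer_instance

-- ===== CLAIM (what is proved, stated in full; the proofs are below) =====
def Claim_equal_compute_legendre_character : Prop := ∀ (a : Int) (n : Int), Dom_compute_legendre_character a n → Pre_compute_legendre_character a n → Spec_compute_legendre_character a n (compute_legendre_character a n)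

-- ===== LEMMAS AND PROOFS =====

theorem pv_half_natAbs (a : Int) (ha : a ≠ 0) (he : PySem.Int.mod a 2 = 0) :
    (PySem.Int.floordiv a 2).natAbs < a.natAbs ∧ PySem.Int.floordiv a 2 ≠ 0 := by
  have h := PySem.Int.floordiv_mul_add_mod a 2
  rw [he] at h
  omega

theorem pv_shift_eq (a : Int) : a >>> (1:Nat) = PySem.Int.floordiv a 2 := by
  rw [Int.shiftRight_eq_div_pow, PySem.Int.floordiv_eq_ediv_of_pos (by norm_num)]
  norm_num

theorem pv_mod_natAbs (x m : Int) (hm : m ≠ 0) : (PySem.Int.mod x m).natAbs < m.natAbs := by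
  rcases lt_or_gt_of_ne hm with h | h
  · have := PySem.Int.mod_neg_bounds x h
    omega
  · have h1 := PySem.Int.mod_nonneg x h
    have h2 := PySem.Int.mod_lt x h
    omega

-- split2B fuel irrelevance
theorem split2B_fuel : ∀ (k m m' : Nat) (x : Int), x.natAbs ≤ k → x ≠ 0 →
    x.natAbs ≤ m → x.natAbs ≤ m' → split2B m x = split2B m' x := by
  intro k
  induction k with
  | zero => intro m m' x hk hx _ _; omega
  | succ k ih =>
    intro k1 k2 x hk hx hm hm'
    by_cases he : PySem.Int.mod x 2 = 0
    · have hh := pv_half_natAbs x hx he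
      obtain ⟨mu, rfl⟩ : ∃ mu, k1 = mu + 1 := ⟨k1 - 1, by omega⟩
      obtain ⟨mv, rfl⟩ : ∃ mv, k2 = mv + 1 := ⟨k2 - 1, by omega⟩
      rw [split2B, split2B, if_neg (by simpa using he), if_neg (by simpa using he)]
      rw [ih mu mv _ (by omega) hh.2 (by omega) (by omega)]
    · obtain ⟨mu, rfl⟩ : ∃ mu, k1 = mu + 1 := ⟨k1 - 1, by omega⟩
      obtain ⟨mv, rfl⟩ : ∃ mv, k2 = mv + 1 := ⟨k2 - 1, by omega⟩
      rw [split2B, split2B, if_pos he, if_pos he]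

-- stripA fuel irrelevance
theorem stripA_fuel : ∀ (k m m' : Nat) (a t n : Int), a.natAbs ≤ k → a ≠ 0 →
    a.natAbs ≤ m → a.natAbs ≤ m' → stripA m a t n = stripA m' a t n := by
  intro k
  induction k with
  | zero => intro m m' a t n hk ha _ _; omega
  | succ k ih =>
    intro m m' a t n hk ha hm hm'
    by_cases he : PySem.Int.mod a 2 = 0
    · have hb : PySem.Int.band a 1 = 0 := by rw [PySem.Int.band_one]; exact he
      have hh := pv_half_natAbs a ha he
      obtain ⟨mu, rfl⟩ : ∃ mu, m = mu + 1 := ⟨m - 1, by omega⟩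
      obtain ⟨mv, rfl⟩ : ∃ mv, m' = mv + 1 := ⟨m' - 1, by omega⟩
      rw [stripA, if_pos hb, stripA, if_pos hb, pv_shift_eq]
      exact ih mu mv _ _ n (by omega) hh.2 (by omega) (by omega)
    · have hb : PySem.Int.band a 1 ≠ 0 := by rw [PySem.Int.band_one]; exact he
      obtain ⟨mu, rfl⟩ : ∃ mu, m = mu + 1 := ⟨m - 1, by omega⟩
      obtain ⟨mv, rfl⟩ : ∃ mv, m' = mv + 1 := ⟨m' - 1, by omega⟩
      rw [stripA, if_neg hb, stripA, if_neg hb]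

-- basic facts about split2B's result: odd part is odd, nonzero, not larger in |·|
theorem split2B_props : ∀ (k : Nat) (x : Int), x.natAbs ≤ k → x ≠ 0 →
    (split2B x.natAbs x).2 ≠ 0 ∧ (split2B x.natAbs x).2.natAbs ≤ x.natAbs ∧
    PySem.Int.mod (split2B x.natAbs x).2 2 ≠ 0 := by
  intro k
  induction k with
  | zero => intro x hk hx; omega
  | succ k ih =>
    intro x hk hx
    by_cases he : PySem.Int.mod x 2 = 0
    · have hh := pv_half_natAbs x hx he
      obtain ⟨mu, hmu⟩ : ∃ mu, x.natAbs = mu + 1 := ⟨x.natAbs - 1, by omega⟩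
      rw [hmu, split2B, if_neg (by simpa using he)]
      dsimp only
      have heq : split2B mu (PySem.Int.floordiv x 2)
          = split2B (PySem.Int.floordiv x 2).natAbs (PySem.Int.floordiv x 2) :=
        split2B_fuel k mu _ _ (by omega) hh.2 (by omega) (le_refl _)
      rw [heq]
      have := ih (PySem.Int.floordiv x 2) (by omega) hh.2
      exact ⟨this.1, by omega, this.2.2⟩
    · obtain ⟨mu, hmu⟩ : ∃ mu, x.natAbs = mu + 1 := ⟨x.natAbs - 1, by omega⟩
      rw [hmu, split2B, if_pos he]
      exact ⟨hx, by omega, he⟩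

-- A's strip loop computes exactly B's split2: same odd part, and the per-step sign flips
-- net out to a single flip iff the 2-adic valuation is odd and n % 8 ∈ {3, 5}
theorem stripA_eq_split2B : ∀ (k : Nat) (a t n : Int), a.natAbs ≤ k → a ≠ 0 →
    stripA a.natAbs a t n =
      ((split2B a.natAbs a).2,
        if (split2B a.natAbs a).1 % 2 = 1 ∧ (PySem.Int.mod n 8 = 3 ∨ PySem.Int.mod n 8 = 5)
        then -t else t) := by
  intro k
  induction k with
  | zero => intro a t n hk ha; omega
  | succ k ih =>
    intro a t n hk ha
    by_cases he : PySem.Int.mod a 2 = 0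
    · have hb : PySem.Int.band a 1 = 0 := by rw [PySem.Int.band_one]; exact he
      have hh := pv_half_natAbs a ha he
      obtain ⟨mu, hmu⟩ : ∃ mu, a.natAbs = mu + 1 := ⟨a.natAbs - 1, by omega⟩
      set a2 := PySem.Int.floordiv a 2 with ha2
      set t' := (if PySem.Int.mod n 8 = 3 ∨ PySem.Int.mod n 8 = 5 then -t else t) with ht'
      rw [hmu, stripA, if_pos hb, pv_shift_eq, ← ha2, ← ht',
          split2B, if_neg (by simpa using he)]
      dsimp only
      rw [stripA_fuel k mu a2.natAbs a2 t' n (by omega) hh.2 (by omega) (by omega),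
          split2B_fuel k mu a2.natAbs a2 (by omega) hh.2 (by omega) (by omega)]
      rw [ih a2 t' n (by omega) hh.2]
      refine Prod.ext rfl ?_
      dsimp only
      by_cases hc : PySem.Int.mod n 8 = 3 ∨ PySem.Int.mod n 8 = 5
      · rw [ht', if_pos hc]
        by_cases hk2 : (split2B a2.natAbs a2).1 % 2 = 1
        · rw [if_pos ⟨hk2, hc⟩, if_neg (fun hx => by omega), neg_neg]
        · rw [if_neg (fun hx => hk2 hx.1), if_pos ⟨by omega, hc⟩]
      · rw [if_neg (fun hx => hc hx.2), if_neg (fun hx => hc hx.2), ht', if_neg hc]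
    · have hb : PySem.Int.band a 1 ≠ 0 := by rw [PySem.Int.band_one]; exact he
      obtain ⟨mu, hmu⟩ : ∃ mu, a.natAbs = mu + 1 := ⟨a.natAbs - 1, by omega⟩
      rw [hmu, stripA, if_neg hb, split2B, if_pos he]
      simp

-- the main invariant: A's outer loop with accumulator t equals t times B's recursive jac
theorem loopA_eq_jacB : ∀ (m : Nat) (a n t : Int) (fA fB : Nat), n ≠ 0 →
    (PySem.Int.mod a n).natAbs ≤ m →
    (PySem.Int.mod a n).natAbs < fA → (PySem.Int.mod a n).natAbs < fB →
    (if (loopA fA (PySem.Int.mod a n) n t).1 = 1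
     then (loopA fA (PySem.Int.mod a n) n t).2 else 0) = t * jacB fB a n := by
  intro m
  induction m with
  | zero =>
    intro a n t fA fB hn hm hA hB
    have h0 : PySem.Int.mod a n = 0 := by omega
    obtain ⟨g, rfl⟩ : ∃ g, fA = g + 1 := ⟨fA - 1, by omega⟩
    obtain ⟨h, rfl⟩ : ∃ h, fB = h + 1 := ⟨fB - 1, by omega⟩
    rw [h0, loopA, if_pos rfl, jacB]
    simp only [h0, if_pos rfl]
    by_cases h1 : n = 1 <;> simp [h1]
  | succ m ih =>
    intro a n t fA fB hn hm hA hB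
    obtain ⟨g, rfl⟩ : ∃ g, fA = g + 1 := ⟨fA - 1, by omega⟩
    obtain ⟨h, rfl⟩ : ∃ h, fB = h + 1 := ⟨fB - 1, by omega⟩
    set a0 := PySem.Int.mod a n with ha0
    by_cases h0 : a0 = 0
    · rw [h0, loopA, if_pos rfl, jacB]
      simp only [← ha0, h0, if_pos rfl]
      by_cases h1 : n = 1 <;> simp [h1]
    · have hprops := split2B_props a0.natAbs a0 (le_refl _) h0
      set p := split2B a0.natAbs a0 with hp
      have hstrip := stripA_eq_split2B a0.natAbs a0 t n (le_refl _) h0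
      have hmlt := pv_mod_natAbs n p.2 hprops.1
      have hple : p.2.natAbs ≤ a0.natAbs := hprops.2.1
      -- unfold one step of A
      rw [loopA, if_neg h0]
      simp only [← hp, hstrip]
      -- unfold one step of B
      rw [jacB]
      simp only [← ha0, if_neg h0, ← hp]
      -- apply the IH at the reduced pair (n, p.2)
      have hrec := ih n p.2
        (if PySem.Int.mod n 4 = PySem.Int.mod p.2 4 ∧ PySem.Int.mod p.2 4 = 3
         then -(if p.1 % 2 = 1 ∧ (PySem.Int.mod n 8 = 3 ∨ PySem.Int.mod n 8 = 5) then -t else t)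
         else (if p.1 % 2 = 1 ∧ (PySem.Int.mod n 8 = 3 ∨ PySem.Int.mod n 8 = 5) then -t else t))
        g h hprops.1 (by omega) (by omega) (by omega)
      rw [hrec]
      -- the accumulated sign equals t times B's multiplicative sign factor
      have hiff : (PySem.Int.mod n 4 = PySem.Int.mod p.2 4 ∧ PySem.Int.mod p.2 4 = 3)
          ↔ (PySem.Int.mod p.2 4 = 3 ∧ PySem.Int.mod n 4 = 3) := by
        constructor <;> rintro ⟨h1, h2⟩ <;> exact ⟨by omega, by omega⟩
      rw [if_congr hiff rfl rfl]
      by_cases hc3 : PySem.Int.mod p.2 4 = 3 ∧ PySem.Int.mod n 4 = 3 <;>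
        by_cases hc2 : p.1 % 2 = 1 ∧ (PySem.Int.mod n 8 = 3 ∨ PySem.Int.mod n 8 = 5) <;>
        simp [hc3, hc2] <;> ring

-- ===== VERDICT (by name: the statement is the Claim_ definition above) =====
theorem compute_legendre_character_spec : Claim_equal_compute_legendre_character := by
  intro a n _ hn
  show (if (loopA ((PySem.Int.mod a n).natAbs + 1) (PySem.Int.mod a n) n 1).1 = 1
        then (loopA ((PySem.Int.mod a n).natAbs + 1) (PySem.Int.mod a n) n 1).2 else 0)
      = compute_legendre_character_alt a n
  rw [loopA_eq_jacB (PySem.Int.mod a n).natAbs a n 1 ((PySem.Int.mod a n).natAbs + 1)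
      ((PySem.Int.mod a n).natAbs + 1) hn (le_refl _) (by omega) (by omega), one_mul]
  rfl
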